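-- pv_equiv track=rewrite | github.com/Dongli99/FoobarChellenges | 01_prime_string_solution.py | Prime_String
-- ===== SOURCE A (Python) =====
-- def Prime_String(n):
--     nums = [i for i in range(2, n+1)]
--     i = 0
--     while i < len(nums):
--         f = nums[i]
--         j = i+1
--         while j < len(nums):
--             if nums[j] % f == 0:
--                 nums.pop(j)
--             else:
--                 j+=1
--         i+=1
--     combined_string = ''.join(str(num) for num in nums)
--     return combined_string
-- ===== SOURCE B (Python) =====
-- def Prime_String(n):
--     def is_prime(k):
--         d = 2
--         while d * d <= k:
--             if k % d == 0:
--                 return False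
--             d += 1
--         return True
--     return "".join(str(k) for k in range(2, n + 1) if is_prime(k))
-- ===== Notes on version B (the rewrite author's own statement) =====
-- stated objective: faster
-- what changed: A destructively sieves a list by repeatedly popping multiples of each survivor in nested while-loops; B is a pure comprehension keeping each k in [2,n] by trial division up to sqrt(k), joined directly.
import Mathlib
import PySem

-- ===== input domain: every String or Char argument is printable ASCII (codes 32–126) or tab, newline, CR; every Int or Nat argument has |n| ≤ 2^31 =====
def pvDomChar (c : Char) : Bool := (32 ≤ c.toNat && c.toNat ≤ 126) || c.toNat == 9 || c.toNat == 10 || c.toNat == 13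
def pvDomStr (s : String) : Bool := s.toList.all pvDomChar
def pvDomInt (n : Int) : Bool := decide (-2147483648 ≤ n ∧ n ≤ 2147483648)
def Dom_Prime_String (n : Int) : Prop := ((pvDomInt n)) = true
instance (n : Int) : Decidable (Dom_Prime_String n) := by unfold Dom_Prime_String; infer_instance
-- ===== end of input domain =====

set_option maxRecDepth 2048


-- B replaces A's destructive pop-based list sieve by a single pure comprehension (trial division); same value, no mutation.

-- ===== PORT A =====
-- inner while loop: 'while j < len(nums): if nums[j] % f == 0: nums.pop(j) else: j += 1'
-- (nums.pop(j) with 0 ≤ j < len(nums) is List.eraseIdx — PySem.List.pop?_natCast)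
def innerA (f : Int) (nums : List Int) (j : Nat) : List Int :=
  if h : j < nums.length then
    if PySem.Int.mod nums[j] f == 0 then
      innerA f (nums.eraseIdx j) j
    else
      innerA f nums (j + 1)
  else
    nums
termination_by nums.length - j
decreasing_by
  · exact List.length_eraseIdx_of_lt h ▸
      Nat.sub_lt_sub_right (Nat.le_pred_of_lt h) (Nat.pred_lt (Nat.lt_of_le_of_lt (Nat.zero_le j) h).ne')
  · exact Nat.sub_succ_lt_self nums.length j h

-- the port's outer loop needs this bound for termination
theorem innerA_length_le (f : Int) (nums : List Int) (j : Nat) :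
    (innerA f nums j).length ≤ nums.length := by
  fun_induction innerA f nums j with
  | case1 nums j h hm ih =>
      have := List.length_eraseIdx_of_lt (l := nums) (i := j) h; omega
  | case2 nums j h hm ih => exact ih
  | case3 nums j h => exact le_rfl

-- outer while loop: 'while i < len(nums): f = nums[i]; (inner loop from j = i+1); i += 1'
def outerA (nums : List Int) (i : Nat) : List Int :=
  if h : i < nums.length then
    outerA (innerA nums[i] nums (i + 1)) (i + 1)
  else
    nums
termination_by nums.length - i
decreasing_by
  exact Nat.lt_of_le_of_lt (Nat.sub_le_sub_right (innerA_length_le nums[i] nums (i + 1)) (i + 1))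
    (Nat.sub_succ_lt_self nums.length i h)

def Prime_String (n : Int) : String :=
  let nums := PySem.List.pyRange 2 (n + 1) 1
  let final := outerA nums 0
  PySem.Str.join "" (final.map PySem.Int.toStr)

-- ===== PORT B =====
-- is_prime's while loop: 'd = 2; while d * d <= k: if k % d == 0: return False; d += 1; return True'
def trialDiv (k : Int) (d : Nat) : Bool :=
  if h : (d : Int) * (d : Int) ≤ k then
    if PySem.Int.mod k (d : Int) == 0 then false
    else trialDiv k (d + 1)
  else true
termination_by k.toNat + 1 - d * d
decreasing_by
  exact Nat.sub_lt_sub_left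
    (Nat.lt_succ_of_le ((Int.le_toNat (le_trans (mul_nonneg (Int.natCast_nonneg d) (Int.natCast_nonneg d)) h)).mpr (by exact_mod_cast h)))
    (Nat.mul_self_lt_mul_self (Nat.lt_succ_self d))

def Prime_String_alt (n : Int) : String :=
  PySem.Str.join ""
    (((PySem.List.pyRange 2 (n + 1) 1).filter (fun k => trialDiv k 2)).map
      PySem.Int.toStr)

-- ===== PRECONDITION & SPEC =====
def Spec_Prime_String (n : Int) (out : String) : Prop := out = Prime_String_alt n
instance (n : Int) (out : String) : Decidable (Spec_Prime_String n out) := by unfold Spec_Prime_String; infer_instance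

-- ===== CLAIM (what is proved, stated in full; the proofs are below) =====
def Claim_equal_Prime_String : Prop := ∀ (n : Int), Dom_Prime_String n → Spec_Prime_String n (Prime_String n)

-- ===== LEMMAS AND PROOFS =====

-- pure form of A's whole sieve: keep the head, filter its multiples out of the tail, recurse
def sieveP : List Int → List Int
  | [] => []
  | f :: rest => f :: sieveP (rest.filter (fun x => PySem.Int.mod x f != 0))
termination_by l => l.length
decreasing_by
  simp only [List.length_unattach, List.length_cons]
  exact Nat.lt_succ_of_le (le_trans (List.length_filter_le _ _) (le_of_eq rest.length_attach))

-- 'x has no divisor smaller than itself in l'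
def keepB (l : List Int) (x : Int) : Bool :=
  l.all (fun d => !(decide (d < x)) || (PySem.Int.mod x d != 0))

-- A's element test 'x % f == 0' is divisibility
theorem modP_ne_iff (x f : Int) : (PySem.Int.mod x f != 0) = true ↔ ¬ f ∣ x := by
  simp [PySem.Int.mod_eq_zero_iff_dvd]

theorem keepB_iff (l : List Int) (x : Int) :
    keepB l x = true ↔ ∀ d ∈ l, d < x → ¬ d ∣ x := by
  simp only [keepB, List.all_eq_true, Bool.or_eq_true, Bool.not_eq_true',
    decide_eq_false_iff_not, modP_ne_iff]
  constructor
  · intro h d hd hlt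
    rcases h d hd with h' | h'
    · exact absurd hlt h'
    · exact h'
  · intro h d hd
    by_cases hlt : d < x
    · exact Or.inr (h d hd hlt)
    · exact Or.inl hlt

theorem innerA_spec (f : Int) (suf : List Int) :
    ∀ pre : List Int, innerA f (pre ++ suf) pre.length
      = pre ++ suf.filter (fun x => PySem.Int.mod x f != 0) := by
  induction suf with
  | nil => intro pre; unfold innerA; simp
  | cons x rest ih =>
      intro pre
      unfold innerA
      have hlt : pre.length < (pre ++ x :: rest).length := by simp
      rw [dif_pos hlt]
      have hx : (pre ++ x :: rest)[pre.length] = x := by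
        simp [List.getElem_append_right]
      rw [hx]
      by_cases hm : PySem.Int.mod x f = 0
      · rw [if_pos (by simpa using hm)]
        have he : (pre ++ x :: rest).eraseIdx pre.length = pre ++ rest := by
          rw [List.eraseIdx_append_of_length_le (le_refl pre.length)]
          simp
        rw [he, ih pre]
        simp [hm]
      · rw [if_neg (by simpa using hm)]
        have harr : pre ++ x :: rest = (pre ++ [x]) ++ rest := by simp
        have hlen : pre.length + 1 = (pre ++ [x]).length := by simp
        rw [harr, hlen, ih (pre ++ [x])]
        simp [hm]

theorem outerA_spec (m : Nat) : ∀ (suf pre : List Int), suf.length ≤ m →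
    outerA (pre ++ suf) pre.length = pre ++ sieveP suf := by
  induction m with
  | zero =>
      intro suf pre hlen
      have : suf = [] := List.eq_nil_of_length_eq_zero (Nat.le_zero.mp hlen)
      subst this
      unfold outerA sieveP; simp
  | succ m ih =>
      intro suf pre hlen
      cases suf with
      | nil => unfold outerA sieveP; simp
      | cons f rest =>
          unfold outerA
          have hlt : pre.length < (pre ++ f :: rest).length := by simp
          rw [dif_pos hlt]
          have hf : (pre ++ f :: rest)[pre.length] = f := by
            simp [List.getElem_append_right]
          rw [hf]
          have harr : pre ++ f :: rest = (pre ++ [f]) ++ rest := by simp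
          have hlen1 : pre.length + 1 = (pre ++ [f]).length := by simp
          rw [harr, hlen1, innerA_spec f rest (pre ++ [f])]
          have hle : (rest.filter (fun x => PySem.Int.mod x f != 0)).length ≤ m := by
            have h1 := List.length_filter_le (fun x => PySem.Int.mod x f != 0) rest
            have h2 : rest.length + 1 ≤ m + 1 := by simpa using hlen
            omega
          rw [ih _ (pre ++ [f]) hle]
          simp [sieveP]

theorem sieveP_spec (m : Nat) : ∀ l : List Int, l.length ≤ m → l.Pairwise (· < ·) →
    sieveP l = l.filter (keepB l) := by
  induction m with
  | zero =>
      intro l hlen _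
      have : l = [] := List.eq_nil_of_length_eq_zero (Nat.le_zero.mp hlen)
      subst this; simp [sieveP]
  | succ m ih =>
      intro l hlen hsort
      cases l with
      | nil => simp [sieveP]
      | cons f rest =>
          have hf : ∀ d ∈ rest, f < d := by
            intro d hd; exact (List.pairwise_cons.mp hsort).1 d hd
          have hrest : rest.Pairwise (· < ·) := (List.pairwise_cons.mp hsort).2
          have hfk : keepB (f :: rest) f = true := by
            rw [keepB_iff]
            intro d hd hdf
            rcases List.mem_cons.mp hd with h | h
            · omega
            · exact absurd hdf (by have := hf d h; omega)
          have hl'sort : (rest.filter (fun x => PySem.Int.mod x f != 0)).Pairwise (· < ·) :=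
            hrest.filter _
          have hl'len : (rest.filter (fun x => PySem.Int.mod x f != 0)).length ≤ m := by
            have h1 := List.length_filter_le (fun x => PySem.Int.mod x f != 0) rest
            have h2 : rest.length + 1 ≤ m + 1 := by simpa using hlen
            omega
          have hih := ih _ hl'len hl'sort
          rw [sieveP, List.filter_cons_of_pos hfk, hih, List.filter_filter]
          congr 1
          apply List.filter_congr
          intro x hx
          have hfx : f < x := hf x hx
          rw [Bool.eq_iff_iff, Bool.and_eq_true, keepB_iff, keepB_iff, modP_ne_iff]
          constructor
          · rintro ⟨hq, hnf⟩ d hd hdx hdvd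
            rcases List.mem_cons.mp hd with h | h
            · exact hnf (h ▸ hdvd)
            · by_cases hfd : f ∣ d
              · exact hnf (dvd_trans hfd hdvd)
              · have hd' : d ∈ rest.filter (fun y => PySem.Int.mod y f != 0) :=
                  List.mem_filter.mpr ⟨h, (modP_ne_iff d f).mpr hfd⟩
                exact hq d hd' hdx hdvd
          · intro hq
            refine ⟨?_, fun hdvd => hq f (List.mem_cons_self) hfx hdvd⟩
            intro d hd hdx hdvd
            have hmem := List.mem_filter.mp hd
            exact hq d (List.mem_cons_of_mem f hmem.1) hdx hdvd

theorem trialDiv_iff (k : Int) (d0 : Nat) :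
    trialDiv k d0 = true ↔
      ∀ d : Nat, d0 ≤ d → (d : Int) * (d : Int) ≤ k → ¬ ((d : Int) ∣ k) := by
  fun_induction trialDiv k d0 with
  | case1 d0 h hm =>
      simp only [Bool.false_eq_true, false_iff, not_forall]
      refine ⟨d0, le_rfl, h, ?_⟩
      simp only [not_not]
      have : PySem.Int.mod k (d0 : Int) = 0 := by simpa using hm
      exact (PySem.Int.mod_eq_zero_iff_dvd k (d0 : Int)).mp this
  | case2 d0 h hm ih =>
      rw [ih]
      have hnd : ¬ ((d0 : Int) ∣ k) := by
        rw [← PySem.Int.mod_eq_zero_iff_dvd]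
        simpa using hm
      constructor
      · intro hq d hd hdd
        rcases Nat.lt_or_ge d0 d with h' | h'
        · exact hq d h' hdd
        · have : d = d0 := Nat.le_antisymm h' hd
          subst this; exact hnd
      · intro hq d hd hdd
        exact hq d (le_of_lt hd) hdd
  | case3 d0 h =>
      simp only [true_iff]
      intro d hd hdd hdvd
      apply h
      calc (d0 : Int) * (d0 : Int) ≤ (d : Int) * (d : Int) := by
            have : (d0 : Int) ≤ (d : Int) := by exact_mod_cast hd
            have h0 : (0 : Int) ≤ (d0 : Int) := Int.natCast_nonneg d0
            nlinarith
        _ ≤ k := hdd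

-- a proper divisor 2 ≤ d < x yields a divisor m with m * m ≤ x
theorem exists_small_divisor (x d : Int) (hd2 : 2 ≤ d) (hdx : d < x) (hdvd : d ∣ x) :
    ∃ m : Int, 2 ≤ m ∧ m * m ≤ x ∧ m ∣ x := by
  obtain ⟨e, he⟩ := hdvd
  have he2 : 2 ≤ e := by nlinarith
  rcases le_total d e with hde | hed
  · exact ⟨d, hd2, by nlinarith, ⟨e, he⟩⟩
  · exact ⟨e, he2, by nlinarith, ⟨d, by linarith [he]⟩⟩

-- the sqrt-bounded trial-division test of B coincides with the sieve-survivor test on [2, n+1)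
theorem pred_eq (n : Int) :
    (PySem.List.pyRange 2 (n + 1) 1).filter (keepB (PySem.List.pyRange 2 (n + 1) 1))
      = (PySem.List.pyRange 2 (n + 1) 1).filter (fun k => trialDiv k 2) := by
  apply List.filter_congr
  intro x hx
  have hxr := PySem.List.mem_pyRange_one.mp hx
  rw [Bool.eq_iff_iff, keepB_iff, trialDiv_iff]
  constructor
  · intro h d hd2 hdd hdvd
    have hd2' : (2 : Int) ≤ (d : Int) := by exact_mod_cast hd2
    have hdx : (d : Int) < x := by nlinarith
    exact h (d : Int) (PySem.List.mem_pyRange_one.mpr ⟨hd2', by omega⟩) hdx hdvd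
  · intro h d hd hdx hdvd
    have hd2 : 2 ≤ d := (PySem.List.mem_pyRange_one.mp hd).1
    obtain ⟨m, hm2, hmm, hmdvd⟩ := exists_small_divisor x d hd2 hdx hdvd
    have hmn : ((m.toNat : Int)) = m := Int.toNat_of_nonneg (by linarith)
    refine h m.toNat ?_ ?_ ?_
    · omega
    · rw [hmn]; exact hmm
    · rw [hmn]; exact hmdvd

theorem lists_eq (n : Int) :
    outerA (PySem.List.pyRange 2 (n + 1) 1) 0
      = (PySem.List.pyRange 2 (n + 1) 1).filter (fun k => trialDiv k 2) := by
  have h0 : outerA (PySem.List.pyRange 2 (n + 1) 1) 0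
      = outerA (([] : List Int) ++ PySem.List.pyRange 2 (n + 1) 1) ([] : List Int).length := by
    simp
  rw [h0, outerA_spec (PySem.List.pyRange 2 (n + 1) 1).length _ [] le_rfl, List.nil_append,
    sieveP_spec (PySem.List.pyRange 2 (n + 1) 1).length _ le_rfl
      (PySem.List.pairwise_lt_pyRange_one 2 (n + 1))]
  exact pred_eq n

-- ===== VERDICT (by name: the statement is the Claim_ definition above) =====
theorem Prime_String_spec : Claim_equal_Prime_String := by
  intro n _
  show PySem.Str.join "" ((outerA (PySem.List.pyRange 2 (n + 1) 1) 0).map PySem.Int.toStr)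
      = Prime_String_alt n
  rw [lists_eq n]
  rfl
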